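-- pv_equiv track=rewrite | github.com/Choi-Seunghwan/coding-questions | job_coding_test/p/2.py | solution
-- ===== SOURCE A (Python) =====
-- def solution(office, k):
--     result = 0
--     N = len(office)
--
--     for i in range(N - k + 1):
--         for j in range(N - k + 1):
--             count = 0
--             for p1 in range(k):
--                 for p2 in range(k):
--                     if office[p1 + i][p2 + j] == 1:
--                         count += 1
--             if count > result:
--                 result = count
--
--     return result
-- ===== SOURCE B (Python) =====
-- def solution(office, k):
--     N = len(office)
--     if k <= 0 or k > N:
--         return 0
--     # 2D prefix-sum table: P[i][j] = number of 1s in office[:i][:j]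
--     prev = [0] * (N + 1)
--     P = [prev]
--     for i in range(N):
--         cur = [0]
--         for j in range(N):
--             cur.append(prev[j + 1] + cur[j] - prev[j]
--                        + (1 if office[i][j] == 1 else 0))
--         P.append(cur)
--         prev = cur
--     best = 0
--     for i in range(k, N + 1):
--         for j in range(k, N + 1):
--             c = P[i][j] - P[i - k][j] - P[i][j - k] + P[i - k][j - k]
--             if c > best:
--                 best = c
--     return best
-- ===== Notes on version B (the rewrite author's own statement) =====
-- stated objective: alternative
-- what changed: Replaces A's recount of every k-by-k window by a 2D prefix-sum table built once, with each window's count of 1s read off by inclusion-exclusion; it trades the four nested loops for a table build plus O(1) window reads (an advantage only when k is large).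
import Mathlib
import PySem

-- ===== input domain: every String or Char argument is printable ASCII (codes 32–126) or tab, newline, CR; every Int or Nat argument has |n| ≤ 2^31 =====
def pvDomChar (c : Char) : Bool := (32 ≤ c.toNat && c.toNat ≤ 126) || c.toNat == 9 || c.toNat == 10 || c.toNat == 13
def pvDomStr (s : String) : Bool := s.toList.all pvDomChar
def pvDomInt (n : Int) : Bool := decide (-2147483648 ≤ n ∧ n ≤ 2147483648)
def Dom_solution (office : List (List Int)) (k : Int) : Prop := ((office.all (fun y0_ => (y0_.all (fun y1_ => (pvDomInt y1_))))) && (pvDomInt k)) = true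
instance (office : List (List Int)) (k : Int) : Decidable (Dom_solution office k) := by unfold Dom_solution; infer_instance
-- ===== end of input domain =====

-- B replaces A's per-window recount by a 2D prefix-sum table read by inclusion-exclusion (alternative algorithm).

-- ===== PORT A =====
-- Literal port of A's four nested loops; out-of-range indexing uses the default 0 / [],
-- reached only outside Pre_solution (where Python A raises IndexError).
def solution (office : List (List Int)) (k : Int) : Int :=
  let N : Int := office.length
  (PySem.List.pyRange 0 (N - k + 1) 1).foldl (fun result i =>
    (PySem.List.pyRange 0 (N - k + 1) 1).foldl (fun result j =>
      let count := (PySem.List.pyRange 0 k 1).foldl (fun count p1 =>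
        (PySem.List.pyRange 0 k 1).foldl (fun count p2 =>
          if PySem.List.pyGetD (PySem.List.pyGetD office (p1 + i) []) (p2 + j) 0 = 1 then
            count + 1
          else count) count) (0 : Int)
      if count > result then count else result) result) 0

-- ===== PORT B =====
-- Port of Source B: build the (N+1)×(N+1) prefix-sum table row by row, then scan the windows.
def solution_alt (office : List (List Int)) (k : Int) : Int :=
  let N : Int := office.length
  if k ≤ 0 ∨ N < k then 0
  else
    let prev0 : List Int := List.replicate (N + 1).toNat 0
    let st := (PySem.List.pyRange 0 N 1).foldl (fun (st : List (List Int) × List Int) i =>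
      let cur := (PySem.List.pyRange 0 N 1).foldl (fun (cur : List Int) j =>
        cur ++ [PySem.List.pyGetD st.2 (j + 1) 0 + PySem.List.pyGetD cur j 0
                - PySem.List.pyGetD st.2 j 0
                + (if PySem.List.pyGetD (PySem.List.pyGetD office i []) j 0 = 1 then 1 else 0)])
        [0]
      (st.1 ++ [cur], cur)) ([prev0], prev0)
    let P := st.1
    (PySem.List.pyRange k (N + 1) 1).foldl (fun best i =>
      (PySem.List.pyRange k (N + 1) 1).foldl (fun best j =>
        let c := PySem.List.pyGetD (PySem.List.pyGetD P i []) j 0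
                 - PySem.List.pyGetD (PySem.List.pyGetD P (i - k) []) j 0
                 - PySem.List.pyGetD (PySem.List.pyGetD P i []) (j - k) 0
                 + PySem.List.pyGetD (PySem.List.pyGetD P (i - k) []) (j - k) 0
        if c > best then c else best) best) 0

-- ===== PRECONDITION & SPEC =====
-- Pre_ excludes exactly the inputs on which Python A raises IndexError: when 1 ≤ k ≤ N,
-- A eventually reads column N-1 of every row, so every row must have length ≥ N.
def Pre_solution (office : List (List Int)) (k : Int) : Prop :=
  (1 ≤ k ∧ k ≤ (office.length : Int)) →
    ∀ row ∈ office, (office.length : Int) ≤ (row.length : Int)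
instance (office : List (List Int)) (k : Int) : Decidable (Pre_solution office k) := by
  unfold Pre_solution; infer_instance

def pvWitness_solution : List (List Int) × Int := ([[1, 0], [0, 1]], 2)

def Spec_solution (office : List (List Int)) (k : Int) (out : Int) : Prop := out = solution_alt office k
instance (office : List (List Int)) (k : Int) (out : Int) : Decidable (Spec_solution office k out) := by unfold Spec_solution; infer_instance

-- ===== CLAIM (what is proved, stated in full; the proofs are below) =====
def Claim_equal_solution : Prop := ∀ (office : List (List Int)) (k : Int), Dom_solution office k → Pre_solution office k → Spec_solution office k (solution office k)

-- ===== LEMMAS AND PROOFS =====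

-- the 0/1 indicator for office[p][q] == 1 (default 0 beyond the ends)
def pvInd (office : List (List Int)) (p q : Nat) : Int :=
  if (office.getD p []).getD q 0 = 1 then 1 else 0

-- prefix sums: number of 1s in the top-left a×b corner
def pvS (office : List (List Int)) (a b : Nat) : Int :=
  ∑ p ∈ Finset.range a, ∑ q ∈ Finset.range b, pvInd office p q

theorem pvS_succ_left (office : List (List Int)) (a b : Nat) :
    pvS office (a + 1) b = pvS office a b + ∑ q ∈ Finset.range b, pvInd office a q := by
  simp [pvS, Finset.sum_range_succ]

theorem pvS_rec (office : List (List Int)) (a b : Nat) :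
    pvS office (a + 1) (b + 1) =
      pvS office a (b + 1) + pvS office (a + 1) b - pvS office a b + pvInd office a b := by
  rw [pvS_succ_left, pvS_succ_left, Finset.sum_range_succ]; ring

-- a fold that is the identity on its start value stays there
theorem pv_foldl_fixed {α β : Type} (f : β → α → β) (a : β) (l : List α)
    (h : ∀ x ∈ l, f a x = a) : l.foldl f a = a := by
  induction l with
  | nil => rfl
  | cons x xs ih =>
    simp only [List.foldl_cons, h x (by simp)]
    exact ih (fun y hy => h y (by simp [hy]))

-- counting fold over List.range as a Finset sum
theorem pv_foldl_range_add (f : Nat → Int) (m : Nat) (a : Int) :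
    (List.range m).foldl (fun acc t => acc + f t) a = a + ∑ t ∈ Finset.range m, f t := by
  induction m generalizing a with
  | zero => simp
  | succ m ih => rw [List.range_succ, List.foldl_append, ih, Finset.sum_range_succ]; simp; ring

theorem pv_foldl_range_count (P : Nat → Prop) [DecidablePred P] (m : Nat) (a : Int) :
    (List.range m).foldl (fun acc t => if P t then acc + 1 else acc) a
      = a + ∑ t ∈ Finset.range m, (if P t then (1 : Int) else 0) := by
  rw [← pv_foldl_range_add (fun t => if P t then (1 : Int) else 0) m a]
  apply PySem.List.foldl_congr_mem
  intro acc x _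
  split <;> simp

-- the prefix-sum row a of the table: [pvS a 0, …, pvS a n]
def pvRow (office : List (List Int)) (n a : Nat) : List Int :=
  (List.range (n + 1)).map (fun b => pvS office a b)

theorem pv_getD_map_range (f : Nat → Int) (m j : Nat) (h : j < m) :
    ((List.range m).map f).getD j 0 = f j := by
  simp [List.getD_eq_getElem?_getD, h]

theorem pv_getD_map_range' (f : Nat → List Int) (m j : Nat) (h : j < m) :
    ((List.range m).map f).getD j [] = f j := by
  simp [List.getD_eq_getElem?_getD, h]

theorem pvRow_zero (office : List (List Int)) (n : Nat) :
    pvRow office n 0 = List.replicate (n + 1) 0 := by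
  simp [pvRow, pvS]

theorem pv_sum_range_shift (f : Nat → Int) (a c : Nat) :
    ∑ i ∈ Finset.range (a + c), f i
      = ∑ i ∈ Finset.range a, f i + ∑ i ∈ Finset.range c, f (a + i) := by
  induction c with
  | zero => simp
  | succ c ih => rw [← Nat.add_assoc, Finset.sum_range_succ, ih, Finset.sum_range_succ]; ring

theorem pv_window (office : List (List Int)) (a b kn : Nat) :
    pvS office (a + kn) (b + kn) - pvS office a (b + kn)
      - pvS office (a + kn) b + pvS office a b
    = ∑ p ∈ Finset.range kn, ∑ q ∈ Finset.range kn, pvInd office (a + p) (b + q) := by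
  unfold pvS
  rw [pv_sum_range_shift (fun p => ∑ q ∈ Finset.range (b + kn), pvInd office p q) a kn,
      pv_sum_range_shift (fun p => ∑ q ∈ Finset.range b, pvInd office p q) a kn]
  have h : ∀ p, ∑ q ∈ Finset.range (b + kn), pvInd office (a + p) q
      = ∑ q ∈ Finset.range b, pvInd office (a + p) q
        + ∑ q ∈ Finset.range kn, pvInd office (a + p) (b + q) := fun p =>
    pv_sum_range_shift (fun q => pvInd office (a + p) q) b kn
  simp only [h, Finset.sum_add_distrib]
  ring

-- A's inner double loop counts the 1s of the k×k window at (a, b)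
theorem pv_countA (office : List (List Int)) (k : Int) (kn : Nat) (hk : k = (kn : Int))
    (a b : Nat) (ia ib : Int) (ha : ia = (a : Int)) (hb : ib = (b : Int)) :
    (PySem.List.pyRange 0 k 1).foldl (fun count p1 =>
      (PySem.List.pyRange 0 k 1).foldl (fun count p2 =>
        if PySem.List.pyGetD (PySem.List.pyGetD office (p1 + ia) []) (p2 + ib) 0 = 1 then
          count + 1
        else count) count) (0 : Int)
    = ∑ p ∈ Finset.range kn, ∑ q ∈ Finset.range kn, pvInd office (a + p) (b + q) := by
  subst hk ha hb
  simp only [PySem.List.pyRange_one, sub_zero, Int.toNat_natCast, List.foldl_map]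
  trans ((List.range kn).foldl
      (fun c p => c + ∑ q ∈ Finset.range kn, pvInd office (a + p) (b + q)) 0)
  · apply PySem.List.foldl_congr_mem
    intro acc p _
    trans ((List.range kn).foldl (fun count q =>
        if (office.getD (a + p) []).getD (b + q) 0 = 1 then count + 1 else count) acc)
    · apply PySem.List.foldl_congr_mem
      intro c q _
      have h1 : (0 : Int) + (p : Int) + (a : Int) = ((a + p : Nat) : Int) := by push_cast; ring
      have h2 : (0 : Int) + (q : Int) + (b : Int) = ((b + q : Nat) : Int) := by push_cast; ring
      rw [h1, h2]
      simp only [PySem.List.pyGetD_natCast]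
    · rw [pv_foldl_range_count (fun q => (office.getD (a + p) []).getD (b + q) 0 = 1) kn acc]
      rfl
  · rw [pv_foldl_range_add (fun p => ∑ q ∈ Finset.range kn, pvInd office (a + p) (b + q)) kn 0]
    simp

-- one row-building step of B, with indices normalised to Nat
def pvCur (office : List (List Int)) (prev : List Int) (t : Nat) : List Int :=
  (List.range office.length).foldl (fun cur q =>
    cur ++ [prev.getD (q + 1) 0 + cur.getD q 0 - prev.getD q 0 + pvInd office t q]) [0]

def pvStep (office : List (List Int)) (st : List (List Int) × List Int) (t : Nat) :
    List (List Int) × List Int :=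
  (st.1 ++ [pvCur office st.2 t], pvCur office st.2 t)

theorem pv_cur_aux (office : List (List Int)) (a : Nat) (j : Nat) (hj : j ≤ office.length) :
    (List.range j).foldl (fun cur q =>
      cur ++ [(pvRow office office.length a).getD (q + 1) 0 + cur.getD q 0
              - (pvRow office office.length a).getD q 0 + pvInd office a q]) [0]
    = (List.range (j + 1)).map (fun b => pvS office (a + 1) b) := by
  induction j with
  | zero => simp [pvS]
  | succ j ih =>
    rw [List.range_succ, List.foldl_append, ih (by omega)]
    have h1 : ((List.range (j + 1)).map (fun b => pvS office (a + 1) b)).getD j 0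
        = pvS office (a + 1) j := pv_getD_map_range _ _ _ (by omega)
    have h2 : (pvRow office office.length a).getD (j + 1) 0 = pvS office a (j + 1) :=
      pv_getD_map_range _ _ _ (by omega)
    have h3 : (pvRow office office.length a).getD j 0 = pvS office a j :=
      pv_getD_map_range _ _ _ (by omega)
    simp only [List.foldl_cons, List.foldl_nil, h1, h2, h3]
    rw [List.range_succ (n := j + 1), List.map_append]
    congr 1
    simp [pvS_rec]

theorem pv_cur_eq (office : List (List Int)) (a : Nat) :
    pvCur office (pvRow office office.length a) a = pvRow office office.length (a + 1) := by
  unfold pvCur pvRow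
  exact pv_cur_aux office a office.length le_rfl

theorem pv_pair_cong {a : Type} (x y : a) (l : List a) (h : x = y) :
    (l ++ [x], x) = (l ++ [y], y) := by rw [h]

theorem pv_cur' (office : List (List Int)) (prev : List Int) (a : Nat) :
    (List.range office.length).foldl (fun (cur : List Int) (q : Nat) =>
      cur ++ [PySem.List.pyGetD prev ((0 : Int) + (q : Int) + 1) 0
              + PySem.List.pyGetD cur ((0 : Int) + (q : Int)) 0
              - PySem.List.pyGetD prev ((0 : Int) + (q : Int)) 0
              + (if PySem.List.pyGetD (PySem.List.pyGetD office ((0 : Int) + (a : Int)) [])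
                    ((0 : Int) + (q : Int)) 0 = 1 then 1 else 0)]) [0]
    = pvCur office prev a := by
  unfold pvCur
  apply PySem.List.foldl_congr_mem
  intro cur q hq
  simp only [List.mem_range] at hq
  simp only [zero_add]
  rw [show ((q : Int) + 1) = ((q + 1 : Nat) : Int) by push_cast; ring]
  simp only [PySem.List.pyGetD_natCast]
  rfl

theorem pv_build_inv (office : List (List Int)) (i : Nat) (hi : i ≤ office.length) :
    (List.range i).foldl (pvStep office)
      ([pvRow office office.length 0], pvRow office office.length 0)
    = ((List.range (i + 1)).map (pvRow office office.length), pvRow office office.length i) := by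
  induction i with
  | zero => simp
  | succ i ih =>
    rw [List.range_succ, List.foldl_append, ih (by omega)]
    simp only [List.foldl_cons, List.foldl_nil, pvStep, pv_cur_eq]
    rw [List.range_succ (n := i + 1), List.map_append]
    simp

-- B's table build produces exactly the prefix-sum rows
theorem pv_build (office : List (List Int)) :
    ((PySem.List.pyRange 0 (office.length : Int) 1).foldl
      (fun (st : List (List Int) × List Int) i =>
        let cur := (PySem.List.pyRange 0 (office.length : Int) 1).foldl (fun (cur : List Int) j =>
          cur ++ [PySem.List.pyGetD st.2 (j + 1) 0 + PySem.List.pyGetD cur j 0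
                  - PySem.List.pyGetD st.2 j 0
                  + (if PySem.List.pyGetD (PySem.List.pyGetD office i []) j 0 = 1 then 1 else 0)])
          [0]
        (st.1 ++ [cur], cur))
      ([List.replicate ((office.length : Int) + 1).toNat 0],
       List.replicate ((office.length : Int) + 1).toNat 0)).1
    = (List.range (office.length + 1)).map (pvRow office office.length) := by
  rw [PySem.List.pyRange_one]
  simp only [sub_zero, Int.toNat_natCast, List.foldl_map]
  have hrep : ((office.length : Int) + 1).toNat = office.length + 1 := by omega
  rw [hrep, ← pvRow_zero office office.length]
  refine Eq.trans (congrArg Prod.fst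
    (Eq.trans (PySem.List.foldl_congr_mem _ _ _ _ ?_) (pv_build_inv office office.length le_rfl))) rfl
  intro st t _
  dsimp only [pvStep]
  apply pv_pair_cong
  exact pv_cur' office st.2 t

theorem pv_row_getD (office : List (List Int)) (n a j : Nat) (h : j ≤ n) :
    (pvRow office n a).getD j 0 = pvS office a j := by
  unfold pvRow
  exact pv_getD_map_range _ _ _ (by omega)

theorem solution_spec : Claim_equal_solution := by
  intro office k _ _
  show solution office k = solution_alt office k
  by_cases hk0 : k ≤ 0
  · -- k ≤ 0: A's window loops are empty, B takes the early-return branch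
    simp only [solution, solution_alt]
    rw [if_pos (Or.inl hk0)]
    have hr : PySem.List.pyRange 0 k 1 = [] := PySem.List.pyRange_one_eq_nil hk0
    apply pv_foldl_fixed
    intro i _
    apply pv_foldl_fixed
    intro j _
    simp [hr]
  by_cases hkN : (office.length : Int) < k
  · -- k > N: A's outer range is empty, B takes the early-return branch
    simp only [solution, solution_alt]
    rw [if_pos (Or.inr hkN),
        PySem.List.pyRange_one_eq_nil
          (show ((office.length : Int) - k + 1) ≤ 0 by omega),
        List.foldl_nil]
  · -- main case: 1 ≤ k ≤ N
    obtain ⟨kn, rfl⟩ : ∃ kn : Nat, k = (kn : Int) := ⟨k.toNat, by omega⟩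
    have hkn1 : 1 ≤ kn := by omega
    have hknn : kn ≤ office.length := by omega
    simp only [solution, solution_alt]
    rw [if_neg (by omega)]
    rw [pv_build office]
    rw [PySem.List.pyRange_one 0 ((office.length : Int) - (kn : Int) + 1),
        PySem.List.pyRange_one (kn : Int) ((office.length : Int) + 1)]
    rw [show ((office.length : Int) - (kn : Int) + 1 - 0).toNat = office.length - kn + 1 by omega,
        show ((office.length : Int) + 1 - (kn : Int)).toNat = office.length - kn + 1 by omega]
    simp only [List.foldl_map]
    apply PySem.List.foldl_congr_mem
    intro acc t1 ht1
    apply PySem.List.foldl_congr_mem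
    intro acc2 t2 ht2
    simp only [List.mem_range] at ht1 ht2
    rw [pv_countA office ((kn : Nat) : Int) kn rfl t1 t2 ((0 : Int) + (t1 : Int))
        ((0 : Int) + (t2 : Int)) (zero_add _) (zero_add _)]
    have e1 : ((kn : Int) + (t1 : Int)) = ((t1 + kn : Nat) : Int) := by push_cast; ring
    have e2 : ((kn : Int) + (t2 : Int)) = ((t2 + kn : Nat) : Int) := by push_cast; ring
    rw [e1, e2]
    have f1 : ((t1 + kn : Nat) : Int) - (kn : Int) = ((t1 : Nat) : Int) := by push_cast; ring
    have f2 : ((t2 + kn : Nat) : Int) - (kn : Int) = ((t2 : Nat) : Int) := by push_cast; ring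
    rw [f1, f2]
    simp only [PySem.List.pyGetD_natCast]
    rw [pv_getD_map_range' (pvRow office office.length) (office.length + 1) (t1 + kn) (by omega),
        pv_getD_map_range' (pvRow office office.length) (office.length + 1) t1 (by omega),
        pv_row_getD office office.length (t1 + kn) (t2 + kn) (by omega),
        pv_row_getD office office.length (t1 + kn) t2 (by omega),
        pv_row_getD office office.length t1 (t2 + kn) (by omega),
        pv_row_getD office office.length t1 t2 (by omega)]
    rw [pv_window office t1 t2 kn]
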